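-- pv_equiv track=rewrite | github.com/jis8140/2023-algorithm-study | Level_3/sidewall_repair.py | solution
-- ===== SOURCE A (Python) =====
-- def solution(n: int, weak: list, dist: list) -> int:
--     dist.sort(reverse=True)
--
--     repair_list = {()}
--     count = 0
--     for friend_dist in dist:
--         count += 1
--
--         friend_repair = []
--         for i, point in enumerate(weak):
--             start = point
--             ends = weak[i:] + [n + w for w in weak[:i]]
--             move = [end % n for end in ends if end - start <= friend_dist]
--             friend_repair.append(set(move))
--
--         candidate = set()
--         for current in friend_repair:
--             for before in repair_list:
--                 new = current | set(before)
--                 if len(new) == len(weak):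
--                     return count
--
--                 candidate.add(tuple(new))
--         repair_list = candidate
--
--     return -1
-- ===== SOURCE B (Python) =====
-- def solution(n: int, weak: list, dist: list) -> int:
--     dist.sort(reverse=True)
--     W = len(weak)
--     if W == 0:
--         return 0
--
--     frontier = [frozenset()]
--     count = 0
--     for d in dist:
--         count += 1
--         arcs = []
--         for i, start in enumerate(weak):
--             ends = weak[i:] + [n + w for w in weak[:i]]
--             a = frozenset(e % n for e in ends if e - start <= d)
--             if a not in arcs:
--                 arcs.append(a)
--         cand = []
--         seen = set()
--         for f in frontier:
--             for a in arcs: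
--                 u = f | a
--                 if len(u) == W:
--                     return count
--                 if u not in seen:
--                     seen.add(u)
--                     cand.append(u)
--         frontier = []
--         for u in sorted(cand, key=len, reverse=True):
--             if not any(len(u) < len(v) and u < v for v in frontier):
--                 frontier.append(u)
--     return -1
-- ===== Notes on version B (the rewrite author's own statement) =====
-- stated objective: alternative
-- what changed: A materialises, level by level, the set of ALL unions achievable by the first k friends; B instead maintains a dominance-pruned frontier (deduplicated, and only subset-maximal covered sets are kept after each level), preserving the first level at which full coverage is reachable.
-- intended difference: On an empty weak list A returns -1 (its candidate loop never runs, so full coverage is never detected) while B returns 0, the intended answer when there is nothing to repair. — e.g. on solution(5, [], [1]): A returns -1, B returns 0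
import Mathlib
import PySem

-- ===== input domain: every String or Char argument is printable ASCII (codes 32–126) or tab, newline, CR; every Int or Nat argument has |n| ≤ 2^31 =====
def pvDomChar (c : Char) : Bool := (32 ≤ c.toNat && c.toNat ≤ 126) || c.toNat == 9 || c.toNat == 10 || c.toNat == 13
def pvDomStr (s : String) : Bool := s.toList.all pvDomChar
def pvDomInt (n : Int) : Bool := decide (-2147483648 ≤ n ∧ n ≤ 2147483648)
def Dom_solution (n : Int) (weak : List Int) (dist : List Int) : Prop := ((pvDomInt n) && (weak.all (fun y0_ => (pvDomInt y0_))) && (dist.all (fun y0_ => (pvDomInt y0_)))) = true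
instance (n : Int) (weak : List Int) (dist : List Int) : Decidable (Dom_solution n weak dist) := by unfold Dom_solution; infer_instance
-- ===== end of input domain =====

-- B replaces A's level-by-level set of ALL achievable unions by a dominance-pruned frontier
-- (only ⊆-maximal covered sets are kept): a different search strategy of comparable cost.
-- Both Pythons sort `dist` in place (same observable mutation); the theorems are about the return value.
-- `tuple(new)` / frozenset iteration order in the Pythons is hash order, but it is only ever consumed
-- as a set again, so the returned int never depends on it; the ports carry the sets as PySem.Set.

-- ===== PORT A =====
-- shared inner comprehension (textually identical in Source A and Source B):
-- ends = weak[i:] + [n + w for w in weak[:i]]; [e % n for e in ends if e - start <= d]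
def pvMove (n : Int) (weak : List Int) (d : Int) (i start : Int) : List Int :=
  let ends := PySem.List.slice weak (some i) none ++ (PySem.List.slice weak none (some i)).map (fun w => n + w)
  (ends.filter (fun e => decide (e - start ≤ d))).map (fun e => PySem.Int.mod e n)

-- friend_repair: for i, point in enumerate(weak): friend_repair.append(set(move))
def pvFriendRepair (n : Int) (weak : List Int) (d : Int) : List (PySem.Set Int) :=
  (PySem.List.enumerate weak).foldl
    (fun fr p => fr ++ [PySem.Set.ofList (pvMove n weak d p.1 p.2)]) []

-- the main 'for friend_dist in dist' loop with its early 'return count';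
-- 'candidate' is a Python set of tuples consumed only as a set of sets again: ported as the
-- list of all unions (the tuple-level dedup changes only multiplicity, never the returned int)
def pvLoopA (n : Int) (weak : List Int) : List Int → List (PySem.Set Int) → Int → Int
  | [], _, _ => -1
  | d :: rest, rl, count =>
    let count := count + 1
    let fr := pvFriendRepair n weak d
    if fr.any (fun cur => rl.any (fun b => (PySem.Set.union cur b).length == weak.length)) then
      count
    else
      pvLoopA n weak rest (fr.flatMap (fun cur => rl.map (fun b => PySem.Set.union cur b))) count

def solution (n : Int) (weak : List Int) (dist : List Int) : Int :=
  pvLoopA n weak (PySem.List.sorted dist (fun x => x) true) [PySem.Set.empty] 0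

-- ===== PORT B =====
-- 'if u not in seen: cand.append(u)' / 'if a not in arcs: arcs.append(a)' (frozenset equality)
def pvDStep (c : List (PySem.Set Int)) (u : PySem.Set Int) : List (PySem.Set Int) :=
  if c.any (fun x => PySem.Set.equal x u) then c else c ++ [u]

def pvArcs (n : Int) (weak : List Int) (d : Int) : List (PySem.Set Int) :=
  (PySem.List.enumerate weak).foldl
    (fun arcs p => pvDStep arcs (PySem.Set.ofList (pvMove n weak d p.1 p.2))) []

-- 'if not any(len(u) < len(v) and u < v for v in frontier): frontier.append(u)'
def pvPStep (fr : List (PySem.Set Int)) (u : PySem.Set Int) : List (PySem.Set Int) :=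
  if fr.any (fun v => decide (u.length < v.length) && (PySem.Set.issubset u v && !PySem.Set.equal u v))
  then fr else fr ++ [u]

def pvLoopB (n : Int) (weak : List Int) : List Int → List (PySem.Set Int) → Int → Int
  | [], _, _ => -1
  | d :: rest, frontier, count =>
    let count := count + 1
    let arcs := pvArcs n weak d
    if frontier.any (fun f => arcs.any (fun a => (PySem.Set.union f a).length == weak.length)) then
      count
    else
      let cand := frontier.foldl
        (fun c f => arcs.foldl (fun c a => pvDStep c (PySem.Set.union f a)) c) []
      let fr' := (PySem.List.sorted cand (fun u => PySem.List.len u) true).foldl pvPStep []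
      pvLoopB n weak rest fr' count

def solution_alt (n : Int) (weak : List Int) (dist : List Int) : Int :=
  let ds := PySem.List.sorted dist (fun x => x) true
  if weak.length == 0 then 0
  else pvLoopB n weak ds [PySem.Set.empty] 0

-- ===== PRECONDITION & SPEC =====
-- Pre_ excludes only inputs where A raises: with a nonempty `weak` and n = 0 the expression
-- `end % n` raises ZeroDivisionError (B raises there too).
def Pre_solution (n : Int) (weak : List Int) (dist : List Int) : Prop := weak ≠ [] → n ≠ 0
instance (n : Int) (weak : List Int) (dist : List Int) : Decidable (Pre_solution n weak dist) := by
  unfold Pre_solution; infer_instance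
def pvWitness_solution : Int × List Int × List Int := (7, [1, 3], [2, 1])

-- On an empty `weak` there is nothing to repair, so the intended answer is 0; A compares covered
-- sets against len(weak) only for candidates built from at least one start point and so returns -1
-- there, while B returns the intended 0.
def D_solution (n : Int) (weak : List Int) (dist : List Int) : Prop := weak = []
instance (n : Int) (weak : List Int) (dist : List Int) : Decidable (D_solution n weak dist) := by
  unfold D_solution; infer_instance

def Spec_solution (n : Int) (weak : List Int) (dist : List Int) (out : Int) : Prop :=
  ¬ D_solution n weak dist → out = solution_alt n weak dist
instance (n : Int) (weak : List Int) (dist : List Int) (out : Int) : Decidable (Spec_solution n weak dist out) := by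
  unfold Spec_solution; infer_instance

def pvDiffWitness_solution : Int × List Int × List Int := (5, [], [1])
def pvDiffWitnessOut_solution : Int × Int := (-1, 0)

-- ===== CLAIM (what is proved, stated in full; the proofs are below) =====
def Claim_unchanged_solution : Prop := ∀ (n : Int) (weak : List Int) (dist : List Int), Dom_solution n weak dist → Pre_solution n weak dist → Spec_solution n weak dist (solution n weak dist)
def Claim_changed_solution : Prop := Dom_solution (pvDiffWitness_solution.1) (pvDiffWitness_solution.2.1) (pvDiffWitness_solution.2.2) ∧ Pre_solution (pvDiffWitness_solution.1) (pvDiffWitness_solution.2.1) (pvDiffWitness_solution.2.2) ∧ D_solution (pvDiffWitness_solution.1) (pvDiffWitness_solution.2.1) (pvDiffWitness_solution.2.2) ∧ solution (pvDiffWitness_solution.1) (pvDiffWitness_solution.2.1) (pvDiffWitness_solution.2.2) = pvDiffWitnessOut_solution.1 ∧ solution_alt (pvDiffWitness_solution.1) (pvDiffWitness_solution.2.1) (pvDiffWitness_solution.2.2) = pvDiffWitnessOut_solution.2 ∧ pvDiffWitnessOut_solution.1 ≠ pvDiffWitnessOut_solution.2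
def Claim_exact_solution : Prop := ∀ (n : Int) (weak : List Int) (dist : List Int), Dom_solution n weak dist → Pre_solution n weak dist → D_solution n weak dist → solution n weak dist ≠ solution_alt n weak dist

-- ===== LEMMAS AND PROOFS =====

-- the ambient list of coverable values: every covered point is some w % n, w ∈ weak
def pvVals (n : Int) (weak : List Int) : List Int := weak.map (fun w => PySem.Int.mod w n)

-- a well-formed covered set: no duplicates, all members coverable
def pvGood (n : Int) (weak : List Int) (s : List Int) : Prop :=
  s.Nodup ∧ ∀ x ∈ s, x ∈ pvVals n weak

-- the simulation relation between A's repair_list and B's (pruned) frontier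
def pvRel (n : Int) (weak : List Int) (rl fr : List (List Int)) : Prop :=
  rl ≠ [] ∧ fr ≠ [] ∧ (∀ s ∈ rl, pvGood n weak s) ∧ (∀ s ∈ fr, pvGood n weak s) ∧
  (∀ b ∈ rl, ∃ f ∈ fr, ∀ x ∈ b, x ∈ f) ∧ (∀ f ∈ fr, ∃ b ∈ rl, ∀ x, x ∈ f ↔ x ∈ b)

lemma pvMove_mem_vals (n : Int) (weak : List Int) (d i start x : Int)
    (hx : x ∈ pvMove n weak d i start) : x ∈ pvVals n weak := by
  simp only [pvMove, pvVals, List.mem_map, List.mem_filter, List.mem_append] at hx ⊢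
  obtain ⟨e, ⟨he, -⟩, rfl⟩ := hx
  rcases he with h | h
  · exact ⟨e, PySem.List.mem_of_mem_slice weak _ _ h, rfl⟩
  · obtain ⟨w, hw, rfl⟩ := h
    exact ⟨w, PySem.List.mem_of_mem_slice weak _ _ hw,
      by simp [PySem.Int.mod, Int.add_fmod_left]⟩

lemma pvFriendRepair_eq_map (n : Int) (weak : List Int) (d : Int) :
    pvFriendRepair n weak d =
      (PySem.List.enumerate weak).map (fun p => PySem.Set.ofList (pvMove n weak d p.1 p.2)) := by
  rw [pvFriendRepair, PySem.List.foldl_append_singleton_eq_map]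
  simp

lemma sub_dedupFold (l : List (PySem.Set Int)) (acc : List (PySem.Set Int)) :
    ∀ x ∈ acc, x ∈ l.foldl pvDStep acc := by
  induction l generalizing acc with
  | nil => exact fun x h => h
  | cons a l ih =>
    intro x hx
    simp only [List.foldl_cons]
    apply ih
    rw [pvDStep]; split
    · exact hx
    · exact List.mem_append_left _ hx

lemma mem_dedupFold (l : List (PySem.Set Int)) (acc : List (PySem.Set Int)) :
    ∀ x ∈ l.foldl pvDStep acc, x ∈ acc ∨ x ∈ l := by
  induction l generalizing acc with
  | nil => exact fun x h => Or.inl h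
  | cons a l ih =>
    intro x hx
    simp only [List.foldl_cons] at hx
    rcases ih (pvDStep acc a) x hx with h | h
    · rw [pvDStep] at h
      split at h
      · exact Or.inl h
      · rcases List.mem_append.1 h with h | h
        · exact Or.inl h
        · simp only [List.mem_singleton] at h
          subst h
          exact Or.inr (List.mem_cons_self ..)
    · exact Or.inr (List.mem_cons_of_mem _ h)

lemma rep_dedupFold (l : List (PySem.Set Int)) (acc : List (PySem.Set Int)) :
    ∀ s ∈ l, ∃ t ∈ l.foldl pvDStep acc, ∀ x, x ∈ t ↔ x ∈ s := by
  induction l generalizing acc with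
  | nil => intro s hs; simp at hs
  | cons a l ih =>
    intro s hs
    simp only [List.foldl_cons]
    rcases List.mem_cons.1 hs with rfl | hs
    · by_cases h : (acc.any fun x => PySem.Set.equal x s) = true
      · obtain ⟨x, hxacc, hxeq⟩ := List.any_eq_true.1 h
        refine ⟨x, sub_dedupFold l _ x ?_, fun y => ((PySem.Set.equal_iff x s).1 hxeq y)⟩
        rw [pvDStep, if_pos h]; exact hxacc
      · refine ⟨s, sub_dedupFold l _ s ?_, fun y => Iff.rfl⟩
        rw [pvDStep, if_neg h]
        exact List.mem_append_right _ (List.mem_cons_self ..)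
    · exact ih (pvDStep acc a) s hs

lemma sub_pruneFold (l : List (PySem.Set Int)) (acc : List (PySem.Set Int)) :
    ∀ x ∈ acc, x ∈ l.foldl pvPStep acc := by
  induction l generalizing acc with
  | nil => exact fun x h => h
  | cons a l ih =>
    intro x hx
    simp only [List.foldl_cons]
    apply ih
    rw [pvPStep]; split
    · exact hx
    · exact List.mem_append_left _ hx

lemma mem_pruneFold (l : List (PySem.Set Int)) (acc : List (PySem.Set Int)) :
    ∀ x ∈ l.foldl pvPStep acc, x ∈ acc ∨ x ∈ l := by
  induction l generalizing acc with
  | nil => exact fun x h => Or.inl h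
  | cons a l ih =>
    intro x hx
    simp only [List.foldl_cons] at hx
    rcases ih (pvPStep acc a) x hx with h | h
    · rw [pvPStep] at h
      split at h
      · exact Or.inl h
      · rcases List.mem_append.1 h with h | h
        · exact Or.inl h
        · simp only [List.mem_singleton] at h
          subst h
          exact Or.inr (List.mem_cons_self ..)
    · exact Or.inr (List.mem_cons_of_mem _ h)

lemma dom_pruneFold (l : List (PySem.Set Int)) (acc : List (PySem.Set Int)) :
    ∀ s ∈ l, ∃ t ∈ l.foldl pvPStep acc, ∀ x ∈ s, x ∈ t := by
  induction l generalizing acc with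
  | nil => intro s hs; simp at hs
  | cons a l ih =>
    intro s hs
    simp only [List.foldl_cons]
    rcases List.mem_cons.1 hs with rfl | hs
    · by_cases h : (acc.any fun v =>
          decide (s.length < v.length) && (PySem.Set.issubset s v && !PySem.Set.equal s v)) = true
      · obtain ⟨v, hvacc, hvc⟩ := List.any_eq_true.1 h
        simp only [Bool.and_eq_true] at hvc
        refine ⟨v, sub_pruneFold l _ v ?_,
          fun x hx => (PySem.Set.issubset_iff s v).1 hvc.2.1 x hx⟩
        rw [pvPStep, if_pos h]; exact hvacc
      · refine ⟨s, sub_pruneFold l _ s ?_, fun x hx => hx⟩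
        rw [pvPStep, if_neg h]
        exact List.mem_append_right _ (List.mem_cons_self ..)
    · exact ih (pvPStep acc a) s hs

lemma pvGood_length_le (n : Int) (weak : List Int) (s : List Int) (h : pvGood n weak s) :
    s.length ≤ weak.length := by
  have h1 : s.length ≤ (pvVals n weak).length :=
    List.Subperm.length_le (List.subperm_of_subset h.1 (fun x hx => h.2 x hx))
  simpa [pvVals] using h1

lemma pvFull_mono (n : Int) (weak : List Int) (s t : List Int) (hs : pvGood n weak s)
    (ht : pvGood n weak t) (hsub : ∀ x ∈ s, x ∈ t) (hfull : s.length = weak.length) :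
    t.length = weak.length := by
  have h1 := pvGood_length_le n weak t ht
  have h2 : s.length ≤ t.length :=
    List.Subperm.length_le (List.subperm_of_subset hs.1 (fun x hx => hsub x hx))
  omega

lemma pvGood_union (n : Int) (weak : List Int) (s t : List Int) (hs : pvGood n weak s)
    (ht : pvGood n weak t) : pvGood n weak (PySem.Set.union s t) := by
  refine ⟨PySem.Set.nodup_union s t hs.1, fun x hx => ?_⟩
  rcases (PySem.Set.mem_union s t x).1 hx with h | h
  · exact hs.2 x h
  · exact ht.2 x h

lemma pvGood_arc (n : Int) (weak : List Int) (d : Int) (p : Int × Int) :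
    pvGood n weak (PySem.Set.ofList (pvMove n weak d p.1 p.2)) := by
  refine ⟨PySem.Set.nodup_ofList _, fun x hx => ?_⟩
  exact pvMove_mem_vals n weak d p.1 p.2 x ((PySem.Set.mem_ofList _ x).1 hx)

lemma pvGood_length_eq (n : Int) (weak : List Int) (s t : List Int) (hs : pvGood n weak s)
    (ht : pvGood n weak t) (h : ∀ x, x ∈ s ↔ x ∈ t) : s.length = t.length :=
  List.Perm.length_eq ((List.perm_ext_iff_of_nodup hs.1 ht.1).2 h)

lemma pvLoop_eq (n : Int) (weak : List Int) (hw : weak ≠ []) :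
    ∀ (ds : List Int) (rl fr : List (List Int)) (count : Int), pvRel n weak rl fr →
      pvLoopA n weak ds rl count = pvLoopB n weak ds fr count := by
  intro ds
  induction ds with
  | nil => intro rl fr count _; rfl
  | cons d rest ih =>
    intro rl fr count hrel
    obtain ⟨hrl, hfr, hgrl, hgfr, hsub, hrep⟩ := hrel
    have fA := pvFriendRepair_eq_map n weak d
    have fB : pvArcs n weak d =
        ((PySem.List.enumerate weak).map
          (fun p => PySem.Set.ofList (pvMove n weak d p.1 p.2))).foldl pvDStep [] := by
      rw [pvArcs, List.foldl_map]
    have hmne : (PySem.List.enumerate weak).map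
        (fun p => PySem.Set.ofList (pvMove n weak d p.1 p.2)) ≠ [] := by
      cases weak with
      | nil => exact absurd rfl hw
      | cons w ws => simp [PySem.List.enumerate_cons]
    have g1 : ∀ c ∈ pvFriendRepair n weak d, pvGood n weak c := by
      rw [fA]; intro c hc
      obtain ⟨p, -, rfl⟩ := List.mem_map.1 hc
      exact pvGood_arc n weak d p
    have g2 : ∀ a ∈ pvArcs n weak d, a ∈ pvFriendRepair n weak d := by
      rw [fA, fB]; intro a ha
      rcases mem_dedupFold _ [] a ha with h | h
      · simp at h
      · exact h
    have g3 : ∀ c ∈ pvFriendRepair n weak d,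
        ∃ a ∈ pvArcs n weak d, ∀ x, x ∈ a ↔ x ∈ c := by
      rw [fA, fB]; exact fun c hc => rep_dedupFold _ [] c hc
    have hane : pvArcs n weak d ≠ [] := by
      obtain ⟨c, hc⟩ := List.exists_mem_of_ne_nil _ hmne
      obtain ⟨a, ha, -⟩ := g3 c (fA ▸ hc)
      exact List.ne_nil_of_mem ha
    have hcond : ((pvFriendRepair n weak d).any
          (fun cur => rl.any (fun b => (PySem.Set.union cur b).length == weak.length)))
        = (fr.any (fun f => (pvArcs n weak d).any
          (fun a => (PySem.Set.union f a).length == weak.length))) := by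
      apply Bool.coe_iff_coe.mp
      simp only [List.any_eq_true, beq_iff_eq]
      constructor
      · rintro ⟨cur, hcur, b, hb, hlen⟩
        obtain ⟨a, ha, hsame⟩ := g3 cur hcur
        obtain ⟨f, hf, hbf⟩ := hsub b hb
        refine ⟨f, hf, a, ha, ?_⟩
        refine pvFull_mono n weak _ _
          (pvGood_union n weak _ _ (g1 cur hcur) (hgrl b hb))
          (pvGood_union n weak _ _ (hgfr f hf) (g1 a (g2 a ha))) ?_ hlen
        intro x hx
        rcases (PySem.Set.mem_union cur b x).1 hx with h | h
        · exact (PySem.Set.mem_union f a x).2 (Or.inr ((hsame x).2 h))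
        · exact (PySem.Set.mem_union f a x).2 (Or.inl (hbf x h))
      · rintro ⟨f, hf, a, ha, hlen⟩
        obtain ⟨b, hb, hfb⟩ := hrep f hf
        refine ⟨a, g2 a ha, b, hb, ?_⟩
        rw [← hlen]
        refine pvGood_length_eq n weak _ _
          (pvGood_union n weak _ _ (g1 a (g2 a ha)) (hgrl b hb))
          (pvGood_union n weak _ _ (hgfr f hf) (g1 a (g2 a ha))) ?_
        intro x
        rw [PySem.Set.mem_union, PySem.Set.mem_union, ← hfb x]
        tauto
    simp only [pvLoopA, pvLoopB]
    rw [hcond]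
    by_cases hc : (fr.any (fun f => (pvArcs n weak d).any
        (fun a => (PySem.Set.union f a).length == weak.length))) = true
    · rw [if_pos hc, if_pos hc]
    · rw [if_neg hc, if_neg hc]
      apply ih
      -- names for the new states
      have hcand : (fr.foldl (fun c f => (pvArcs n weak d).foldl
            (fun c a => pvDStep c (PySem.Set.union f a)) c) [])
          = (fr.flatMap (fun f => (pvArcs n weak d).map
            (fun a => PySem.Set.union f a))).foldl pvDStep [] := by
        rw [List.foldl_flatMap]
        simp only [List.foldl_map]
      -- membership characterisation of the product list
      have hprod : ∀ x, x ∈ fr.flatMap (fun f => (pvArcs n weak d).map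
            (fun a => PySem.Set.union f a)) ↔
          ∃ f ∈ fr, ∃ a ∈ pvArcs n weak d, x = PySem.Set.union f a := by
        intro x
        simp only [List.mem_flatMap, List.mem_map]
        constructor
        · rintro ⟨f, hf, a, ha, rfl⟩; exact ⟨f, hf, a, ha, rfl⟩
        · rintro ⟨f, hf, a, ha, rfl⟩; exact ⟨f, hf, a, ha, rfl⟩
      have hnewmem : ∀ x, x ∈ (pvFriendRepair n weak d).flatMap
            (fun cur => rl.map (fun b => PySem.Set.union cur b)) ↔
          ∃ cur ∈ pvFriendRepair n weak d, ∃ b ∈ rl, x = PySem.Set.union cur b := by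
        intro x
        simp only [List.mem_flatMap, List.mem_map]
        constructor
        · rintro ⟨c, hcm, b, hb, rfl⟩; exact ⟨c, hcm, b, hb, rfl⟩
        · rintro ⟨c, hcm, b, hb, rfl⟩; exact ⟨c, hcm, b, hb, rfl⟩
      -- fr'-side membership helpers
      have hsmem : ∀ x, x ∈ PySem.List.sorted (fr.foldl (fun c f => (pvArcs n weak d).foldl
            (fun c a => pvDStep c (PySem.Set.union f a)) c) []) (fun u => PySem.List.len u) true ↔
          x ∈ fr.foldl (fun c f => (pvArcs n weak d).foldl
            (fun c a => pvDStep c (PySem.Set.union f a)) c) [] := by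
        intro x
        exact (PySem.List.sorted_perm _ _ _).mem_iff
      constructor
      · -- new rl nonempty
        obtain ⟨cur, hcur⟩ := List.exists_mem_of_ne_nil _ (fA ▸ hmne)
        obtain ⟨b, hb⟩ := List.exists_mem_of_ne_nil _ hrl
        exact List.ne_nil_of_mem ((hnewmem _).2 ⟨cur, hcur, b, hb, rfl⟩)
      refine ⟨?_, ?_, ?_, ?_, ?_⟩
      · -- new fr nonempty
        obtain ⟨f, hf⟩ := List.exists_mem_of_ne_nil _ hfr
        obtain ⟨a, ha⟩ := List.exists_mem_of_ne_nil _ hane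
        obtain ⟨t, ht, -⟩ := rep_dedupFold _ [] (PySem.Set.union f a)
          ((hprod _).2 ⟨f, hf, a, ha, rfl⟩)
        rw [← hcand] at ht
        obtain ⟨t', ht', -⟩ := dom_pruneFold _ [] t ((hsmem t).2 ht)
        exact List.ne_nil_of_mem ht'
      · -- new rl good
        intro s hsm
        obtain ⟨cur, hcur, b, hb, rfl⟩ := (hnewmem s).1 hsm
        exact pvGood_union n weak _ _ (g1 cur hcur) (hgrl b hb)
      · -- new fr good
        intro s hsm
        rcases mem_pruneFold _ [] s hsm with h | h
        · simp at h
        rw [hsmem s, hcand] at h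
        rcases mem_dedupFold _ [] s h with h' | h'
        · simp at h'
        obtain ⟨f, hf, a, ha, rfl⟩ := (hprod s).1 h'
        exact pvGood_union n weak _ _ (hgfr f hf) (g1 a (g2 a ha))
      · -- every new rl set is dominated by a new fr set
        intro b' hb'
        obtain ⟨cur, hcur, b, hb, rfl⟩ := (hnewmem b').1 hb'
        obtain ⟨a, ha, hsame⟩ := g3 cur hcur
        obtain ⟨f, hf, hbf⟩ := hsub b hb
        obtain ⟨t, ht, htu⟩ := rep_dedupFold _ [] (PySem.Set.union f a)
          ((hprod _).2 ⟨f, hf, a, ha, rfl⟩)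
        rw [← hcand] at ht
        obtain ⟨t', ht', htt'⟩ := dom_pruneFold _ [] t ((hsmem t).2 ht)
        refine ⟨t', ht', fun x hx => ?_⟩
        apply htt'
        apply (htu x).2
        rcases (PySem.Set.mem_union cur b x).1 hx with h | h
        · exact (PySem.Set.mem_union f a x).2 (Or.inr ((hsame x).2 h))
        · exact (PySem.Set.mem_union f a x).2 (Or.inl (hbf x h))
      · -- every new fr set has a same-membered new rl set
        intro f' hf'
        rcases mem_pruneFold _ [] f' hf' with h | h
        · simp at h
        rw [hsmem f', hcand] at h
        rcases mem_dedupFold _ [] f' h with h' | h'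
        · simp at h'
        obtain ⟨f, hf, a, ha, rfl⟩ := (hprod f').1 h'
        obtain ⟨b, hb, hfb⟩ := hrep f hf
        refine ⟨PySem.Set.union a b,
          (hnewmem _).2 ⟨a, g2 a ha, b, hb, rfl⟩, fun x => ?_⟩
        rw [PySem.Set.mem_union, PySem.Set.mem_union, hfb x]
        tauto

lemma pvLoopA_weak_nil (n : Int) :
    ∀ (ds : List Int) (rl : List (List Int)) (count : Int), pvLoopA n [] ds rl count = -1 := by
  intro ds
  induction ds with
  | nil => intro rl count; rfl
  | cons d rest ih =>
    intro rl count
    have hfr : pvFriendRepair n [] d = [] := rfl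
    simp only [pvLoopA, hfr]
    simpa using ih _ _

-- ===== VERDICT (by name: the statement is the Claim_ definition above) =====
theorem solution_spec : Claim_unchanged_solution := by
  intro n weak dist _ _ hnD
  have hw : weak ≠ [] := hnD
  rw [solution, solution_alt]
  have hlen : (weak.length == 0) = false := by
    simp [List.length_eq_zero_iff, hw]
  simp only [hlen, Bool.false_eq_true, if_false]
  apply pvLoop_eq n weak hw
  refine ⟨List.cons_ne_nil _ _, List.cons_ne_nil _ _, ?_, ?_, ?_, ?_⟩
  · intro s hs; simp only [List.mem_singleton] at hs; subst hs
    exact ⟨List.nodup_nil, by simp [PySem.Set.empty]⟩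
  · intro s hs; simp only [List.mem_singleton] at hs; subst hs
    exact ⟨List.nodup_nil, by simp [PySem.Set.empty]⟩
  · intro b hb; simp only [List.mem_singleton] at hb; subst hb
    exact ⟨PySem.Set.empty, List.mem_singleton_self _, by simp [PySem.Set.empty]⟩
  · intro f hf; simp only [List.mem_singleton] at hf; subst hf
    exact ⟨PySem.Set.empty, List.mem_singleton_self _, by simp [PySem.Set.empty]⟩

theorem solution_changed : Claim_changed_solution := by
  unfold Claim_changed_solution; decide

theorem solution_tight : Claim_exact_solution := by
  intro n weak dist _ _ hD
  subst hD
  rw [solution, solution_alt, pvLoopA_weak_nil]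
  simp
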